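-- pv_equiv track=rewrite | github.com/lucasvrm/pd-google | auth/dependencies.py | _check_role_access
-- ===== SOURCE A (Python) =====
-- from typing import Optional, List, Callable
--
-- ROLE_HIERARCHY = {
--     "admin": 100,
--     "superadmin": 100,       # Variant of admin
--     "super_admin": 100,      # Variant of admin
--     "manager": 75,
--     "analyst": 50,
--     "new_business": 50,      # Preferred format
--     "newbusiness": 50,       # Legacy format - kept for compatibility
--     "sales": 50,
--     "authenticated": 25,
--     "viewer": 10,
--     "client": 10,
--     "customer": 10,
--     "reader": 10,
-- }
--
-- def _check_role_access(user_role: str, required_roles: List[str]) -> bool: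
--     """
--     Check if the user's role satisfies the required roles.
--
--     If required_roles is empty, any authenticated user is allowed.
--     Otherwise, the user must have one of the required roles OR a role
--     with higher privilege level in the hierarchy.
--
--     Args:
--         user_role: The user's current role
--         required_roles: List of roles that are allowed to access the resource
--
--     Returns:
--         True if access is granted, False otherwise
--     """
--     if not required_roles:
--         return True
--
--     user_role_lower = user_role.lower() if user_role else ""
--     user_level = ROLE_HIERARCHY.get(user_role_lower, 0)
--
--     # Check if user has one of the required roles directly
--     for required_role in required_roles:
--         required_role_lower = required_role.lower()
--         if user_role_lower == required_role_lower:
--             return True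
--
--         # Also check if user has higher privilege than required
--         required_level = ROLE_HIERARCHY.get(required_role_lower, 0)
--         if user_level >= required_level and user_level > 0:
--             return True
--
--     return False
-- ===== SOURCE B (Python) =====
-- ROLE_HIERARCHY = {
--     "admin": 100,
--     "superadmin": 100,
--     "super_admin": 100,
--     "manager": 75,
--     "analyst": 50,
--     "new_business": 50,
--     "newbusiness": 50,
--     "sales": 50,
--     "authenticated": 25,
--     "viewer": 10,
--     "client": 10,
--     "customer": 10,
--     "reader": 10,
-- }
--
-- def _check_role_access(user_role, required_roles):
--     if not required_roles:
--         return True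
--     required = {r.lower() for r in required_roles}
--     min_required_level = min(ROLE_HIERARCHY.get(r, 0) for r in required)
--     user_role_lower = user_role.lower() if user_role else ""
--     user_level = ROLE_HIERARCHY.get(user_role_lower, 0)
--     return user_role_lower in required or (user_level > 0 and user_level >= min_required_level)
-- ===== Notes on version B (the rewrite author's own statement) =====
-- stated objective: alternative
-- what changed: Replaced A's per-element short-circuit loop (compare name, then compare level, return early) by an aggregate-then-decide structure: one pass builds the set of lowercased required roles and the minimum hierarchy level among them, then access is a single membership test or a single level comparison guarded by user_level > 0.
import Mathlib
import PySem

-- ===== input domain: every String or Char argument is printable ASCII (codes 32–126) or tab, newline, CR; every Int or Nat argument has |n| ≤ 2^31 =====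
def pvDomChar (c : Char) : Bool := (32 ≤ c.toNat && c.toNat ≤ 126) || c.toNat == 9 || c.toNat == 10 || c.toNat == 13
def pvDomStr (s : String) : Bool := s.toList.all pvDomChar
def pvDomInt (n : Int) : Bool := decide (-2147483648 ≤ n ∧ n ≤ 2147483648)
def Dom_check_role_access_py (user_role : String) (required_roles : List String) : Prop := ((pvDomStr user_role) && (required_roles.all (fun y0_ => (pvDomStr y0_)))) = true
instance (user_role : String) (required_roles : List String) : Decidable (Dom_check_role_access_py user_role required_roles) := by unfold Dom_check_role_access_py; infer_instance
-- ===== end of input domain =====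

-- B replaces A's per-element short-circuit loop by an aggregate-then-decide form: build the set of
-- lowercased required roles and their minimum hierarchy level, then decide by one membership test
-- plus one level comparison (objective: alternative decomposition, same cost).

-- ===== PORT A =====
def roleHierarchy : PySem.Dict String Int :=
  PySem.Dict.mk [("admin", 100), ("superadmin", 100), ("super_admin", 100), ("manager", 75),
    ("analyst", 50), ("new_business", 50), ("newbusiness", 50), ("sales", 50),
    ("authenticated", 25), ("viewer", 10), ("client", 10), ("customer", 10), ("reader", 10)]

-- the 'for required_role in required_roles' loop with its two early returns
def checkRoleLoop (user_role_lower : String) (user_level : Int) : List String → Bool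
  | [] => false
  | required_role :: rest =>
    let required_role_lower := PySem.Str.lower required_role
    if user_role_lower == required_role_lower then true
    else
      let required_level := PySem.Dict.getD roleHierarchy required_role_lower 0
      if user_level ≥ required_level ∧ user_level > 0 then true
      else checkRoleLoop user_role_lower user_level rest

def check_role_access_py (user_role : String) (required_roles : List String) : Bool :=
  if required_roles = [] then true
  else
    let user_role_lower := if user_role = "" then "" else PySem.Str.lower user_role
    let user_level := PySem.Dict.getD roleHierarchy user_role_lower 0
    checkRoleLoop user_role_lower user_level required_roles

-- ===== PORT B =====
def check_role_access_py_alt (user_role : String) (required_roles : List String) : Bool :=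
  if required_roles.isEmpty then true
  else
    let required : PySem.Set String := PySem.Set.ofList (required_roles.map PySem.Str.lower)
    let levels := required.map (fun r => PySem.Dict.getD roleHierarchy r 0)
    -- min over a nonempty generator; the value is order-independent, so a left fold is exact
    let min_required_level := match levels with
      | [] => 0
      | l :: ls => ls.foldl min l
    let user_role_lower := if user_role = "" then "" else PySem.Str.lower user_role
    let user_level := PySem.Dict.getD roleHierarchy user_role_lower 0
    PySem.Set.contains required user_role_lower ||
      (decide (user_level > 0) && decide (user_level ≥ min_required_level))

-- ===== PRECONDITION & SPEC =====
def Spec_check_role_access_py (user_role : String) (required_roles : List String) (out : Bool) : Prop := out = check_role_access_py_alt user_role required_roles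
instance (user_role : String) (required_roles : List String) (out : Bool) : Decidable (Spec_check_role_access_py user_role required_roles out) := by unfold Spec_check_role_access_py; infer_instance

-- ===== CLAIM (what is proved, stated in full; the proofs are below) =====
def Claim_equal_check_role_access_py : Prop := ∀ (user_role : String) (required_roles : List String), Dom_check_role_access_py user_role required_roles → Spec_check_role_access_py user_role required_roles (check_role_access_py user_role required_roles)

-- ===== LEMMAS AND PROOFS =====

-- A's loop, characterised existentially
lemma checkRoleLoop_eq_true_iff (u : String) (ul : Int) (rs : List String) :
    checkRoleLoop u ul rs = true ↔
      (∃ r ∈ rs, u = PySem.Str.lower r) ∨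
      (ul > 0 ∧ ∃ r ∈ rs, ul ≥ PySem.Dict.getD roleHierarchy (PySem.Str.lower r) 0) := by
  induction rs with
  | nil => simp [checkRoleLoop]
  | cons r rest ih =>
    simp only [checkRoleLoop]
    by_cases h1 : u = PySem.Str.lower r
    · simp [h1]
    · rw [if_neg (by simpa using h1)]
      by_cases h2 : ul ≥ PySem.Dict.getD roleHierarchy (PySem.Str.lower r) 0 ∧ ul > 0
      · rw [if_pos h2]
        exact iff_of_true rfl (Or.inr ⟨h2.2, r, List.mem_cons_self .., h2.1⟩)
      · rw [if_neg h2, ih]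
        constructor
        · rintro (⟨x, hx, hu⟩ | ⟨hp, x, hx, hg⟩)
          · exact Or.inl ⟨x, List.mem_cons_of_mem _ hx, hu⟩
          · exact Or.inr ⟨hp, x, List.mem_cons_of_mem _ hx, hg⟩
        · rintro (⟨x, hx, hu⟩ | ⟨hp, x, hx, hg⟩)
          · rcases List.mem_cons.mp hx with rfl | hx'
            · exact absurd hu h1
            · exact Or.inl ⟨x, hx', hu⟩
          · rcases List.mem_cons.mp hx with rfl | hx'
            · exact absurd ⟨hg, hp⟩ h2
            · exact Or.inr ⟨hp, x, hx', hg⟩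

-- a value dominates foldl min iff it dominates some element (or the seed)
lemma ge_foldl_min_iff (ul a : Int) (xs : List Int) :
    ul ≥ xs.foldl min a ↔ ul ≥ a ∨ ∃ x ∈ xs, ul ≥ x := by
  induction xs generalizing a with
  | nil => simp
  | cons x xs ih =>
    simp only [List.foldl_cons, ih, List.mem_cons]
    constructor
    · rintro (h | ⟨y, hy, h⟩)
      · rcases le_total a x with hax | hxa
        · exact Or.inl (by omega)
        · exact Or.inr ⟨x, Or.inl rfl, by omega⟩
      · exact Or.inr ⟨y, Or.inr hy, h⟩
    · rintro (h | ⟨y, rfl | hy, h⟩)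
      · exact Or.inl (by omega)
      · exact Or.inl (by omega)
      · exact Or.inr ⟨y, hy, h⟩

-- ===== VERDICT (by name: the statement is the Claim_ definition above) =====
theorem check_role_access_py_spec : Claim_equal_check_role_access_py := by
  intro user_role required_roles _
  unfold Spec_check_role_access_py check_role_access_py check_role_access_py_alt
  cases required_roles with
  | nil => simp
  | cons r rs =>
    rw [if_neg (List.cons_ne_nil r rs), show (r :: rs).isEmpty = false from rfl]
    simp only [Bool.false_eq_true, if_false]
    rw [Bool.eq_iff_iff, checkRoleLoop_eq_true_iff]
    simp only [List.map_cons]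
    rw [Bool.or_eq_true, Bool.and_eq_true, decide_eq_true_iff, decide_eq_true_iff,
      PySem.Set.contains_iff, PySem.Set.mem_ofList]
    have hset : ∀ x : String,
        x ∈ PySem.Set.ofList (PySem.Str.lower r :: rs.map PySem.Str.lower) ↔
        x ∈ PySem.Str.lower r :: rs.map PySem.Str.lower := fun x => PySem.Set.mem_ofList ..
    rcases hcons : PySem.Set.ofList (PySem.Str.lower r :: rs.map PySem.Str.lower) with _ | ⟨l0, ls⟩
    · exact absurd ((hset (PySem.Str.lower r)).mpr (by simp)) (by simp [hcons])
    · simp only [List.map_cons, ge_foldl_min_iff]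
      have hmem : ∀ x : String, x ∈ l0 :: ls ↔ x ∈ PySem.Str.lower r :: rs.map PySem.Str.lower := by
        intro x; rw [← hcons]; exact hset x
      generalize (if user_role = "" then "" else PySem.Str.lower user_role) = u
      constructor
      · rintro (⟨x, hx, rfl⟩ | ⟨hpos, x, hx, hge⟩)
        · rcases List.mem_cons.mp hx with rfl | h
          · exact Or.inl (List.mem_cons_self ..)
          · exact Or.inl (List.mem_cons_of_mem _ (List.mem_map_of_mem h))
        · refine Or.inr ⟨hpos, ?_⟩
          have hxin : PySem.Str.lower x ∈ l0 :: ls := by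
            rw [hmem]
            rcases List.mem_cons.mp hx with rfl | h
            · exact List.mem_cons_self ..
            · exact List.mem_cons_of_mem _ (List.mem_map_of_mem h)
          rcases List.mem_cons.mp hxin with heq | h
          · exact Or.inl (heq ▸ hge)
          · exact Or.inr ⟨_, List.mem_map_of_mem h, hge⟩
      · rintro (hin | ⟨hpos, hge | ⟨lv, hlv, hge⟩⟩)
        · rcases List.mem_cons.mp hin with heq | h
          · exact Or.inl ⟨r, List.mem_cons_self .., heq⟩
          · obtain ⟨x, hx, rfl⟩ := List.mem_map.mp h
            exact Or.inl ⟨x, List.mem_cons_of_mem _ hx, rfl⟩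
        · have hl0 : l0 ∈ PySem.Str.lower r :: rs.map PySem.Str.lower := (hmem l0).mp (List.mem_cons_self ..)
          rcases List.mem_cons.mp hl0 with heq | h
          · exact Or.inr ⟨hpos, r, List.mem_cons_self .., heq ▸ hge⟩
          · obtain ⟨x, hx, heq⟩ := List.mem_map.mp h
            exact Or.inr ⟨hpos, x, List.mem_cons_of_mem _ hx, heq ▸ hge⟩
        · obtain ⟨s, hs, rfl⟩ := List.mem_map.mp hlv
          have hsin : s ∈ PySem.Str.lower r :: rs.map PySem.Str.lower := (hmem s).mp (List.mem_cons_of_mem _ hs)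
          rcases List.mem_cons.mp hsin with rfl | h
          · exact Or.inr ⟨hpos, r, List.mem_cons_self .., hge⟩
          · obtain ⟨x, hx, rfl⟩ := List.mem_map.mp h
            exact Or.inr ⟨hpos, x, List.mem_cons_of_mem _ hx, hge⟩
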